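-- pv_equiv track=rewrite | github.com/racrigler44/Rummikub | play_exclusive.py | is_valid_set
-- ===== SOURCE A (Python) =====
-- def is_valid_set(group):
--     if len(group) < 3:
--         return False
--     numbers = set(num for _, num in group)
--     colors = [color for color, _ in group]
--
--     # Valid group: all same number, all different colors
--     if len(numbers) == 1 and len(set(colors)) == len(group):
--         return True
--
--     # Valid run: same color, consecutive numbers
--     if len(set(colors)) == 1:
--         sorted_nums = sorted(num for _, num in group)
--         return all(sorted_nums[i] + 1 == sorted_nums[i + 1] for i in range(len(sorted_nums) - 1))
--
--     return False
-- ===== SOURCE B (Python) =====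
-- def is_valid_set(group):
--     n = len(group)
--     if n < 3:
--         return False
--     nums = {num for _, num in group}
--     cols = {color for color, _ in group}
--     if len(nums) == 1 and len(cols) == n:
--         return True
--     if len(cols) == 1:
--         # run: all numbers distinct and spanning a contiguous range — no sort needed
--         return len(nums) == n and max(num for _, num in group) - min(num for _, num in group) == n - 1
--     return False
-- ===== Notes on version B (the rewrite author's own statement) =====
-- stated objective: simpler
-- what changed: The run check no longer sorts: B tests same color, all-distinct numbers and max-min == len-1 (a contiguous integer range) instead of sorting the numbers and comparing adjacent pairs.
import Mathlib
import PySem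

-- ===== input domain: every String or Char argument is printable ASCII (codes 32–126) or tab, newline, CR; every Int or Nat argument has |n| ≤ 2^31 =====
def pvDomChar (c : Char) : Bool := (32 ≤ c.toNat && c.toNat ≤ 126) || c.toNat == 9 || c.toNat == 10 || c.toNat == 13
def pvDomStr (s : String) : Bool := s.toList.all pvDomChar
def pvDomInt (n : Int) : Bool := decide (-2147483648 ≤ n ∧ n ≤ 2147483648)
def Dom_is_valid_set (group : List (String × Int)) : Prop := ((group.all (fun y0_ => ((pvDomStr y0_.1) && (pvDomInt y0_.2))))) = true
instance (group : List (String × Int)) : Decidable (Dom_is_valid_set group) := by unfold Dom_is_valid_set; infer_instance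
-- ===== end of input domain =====

-- B replaces A's sort-and-compare-adjacent run check by a no-sort check:
-- all numbers distinct and max-min = len-1 (a contiguous integer range); objective: simpler.

-- ===== PORT A =====
def is_valid_set (group : List (String × Int)) : Bool :=
  if group.length < 3 then false
  else
    let numbers : PySem.Set Int := PySem.Set.ofList (group.map (fun p => p.2))
    let colors : List String := group.map (fun p => p.1)
    if numbers.length == 1 && (PySem.Set.ofList colors).length == group.length then true
    else if (PySem.Set.ofList colors).length == 1 then
      let sorted_nums := PySem.List.sorted (group.map (fun p => p.2)) (fun x => x) false
      (PySem.List.pyRange 0 ((sorted_nums.length : Int) - 1) 1).all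
        (fun i => PySem.List.pyGetD sorted_nums i 0 + 1 == PySem.List.pyGetD sorted_nums (i + 1) 0)
    else false

-- ===== PORT B =====
def is_valid_set_alt (group : List (String × Int)) : Bool :=
  let n := group.length
  if n < 3 then false
  else
    let nums : PySem.Set Int := PySem.Set.ofList (group.map (fun p => p.2))
    let cols : PySem.Set String := PySem.Set.ofList (group.map (fun p => p.1))
    if nums.length == 1 && cols.length == n then true
    else if cols.length == 1 then
      nums.length == n &&
        (match PySem.List.max? (group.map (fun p => p.2)) (fun x => x),
               PySem.List.min? (group.map (fun p => p.2)) (fun x => x) with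
         | some mx, some mn => mx - mn == (n : Int) - 1
         | _, _ => false)
    else false

-- ===== PRECONDITION & SPEC =====
def Spec_is_valid_set (group : List (String × Int)) (out : Bool) : Prop := out = is_valid_set_alt group
instance (group : List (String × Int)) (out : Bool) : Decidable (Spec_is_valid_set group out) := by unfold Spec_is_valid_set; infer_instance

-- ===== CLAIM (what is proved, stated in full; the proofs are below) =====
def Claim_equal_is_valid_set : Prop := ∀ (group : List (String × Int)), Dom_is_valid_set group → Spec_is_valid_set group (is_valid_set group)

-- ===== LEMMAS AND PROOFS =====

def adjB : List Int → Bool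
  | a :: b :: t => (a + 1 == b) && adjB (b :: t)
  | _ => true

theorem rangeAdj (s : List Int) :
    ((List.range (s.length - 1)).all fun k => s.getD k 0 + 1 == s.getD (k+1) 0) = adjB s := by
  induction s with
  | nil => rfl
  | cons a t ih =>
    cases t with
    | nil => rfl
    | cons b u =>
      simp only [List.length_cons, Nat.add_sub_cancel, List.range_succ_eq_map, List.all_cons,
        List.all_map] at *
      simp only [adjB]
      rw [← ih]
      rfl

theorem allAdj_eq_adjB (s : List Int) :
    (PySem.List.pyRange 0 ((s.length : Int) - 1) 1).all
      (fun i => PySem.List.pyGetD s i 0 + 1 == PySem.List.pyGetD s (i + 1) 0) = adjB s := by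
  rw [PySem.List.pyRange_one]
  rw [← rangeAdj s]
  have h : ((s.length : Int) - 1 - 0).toNat = s.length - 1 := by omega
  rw [h]
  simp only [List.all_map, zero_add]
  congr 1
  funext k
  have hk : ((k : Int) + 1) = ((k + 1 : Nat) : Int) := by push_cast; ring
  simp only [Function.comp_apply, hk, PySem.List.pyGetD_natCast]

theorem ofList_toFinset (xs : List Int) : (PySem.Set.ofList xs : List Int).toFinset = xs.toFinset := by
  ext y
  simp [PySem.Set.mem_ofList]

theorem ofList_len_eq_iff (xs : List Int) :
    (PySem.Set.ofList xs).length = xs.length ↔ xs.Nodup := by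
  constructor
  · intro h
    have h1 : (PySem.Set.ofList xs : List Int).toFinset.card = (PySem.Set.ofList xs : List Int).length :=
      List.toFinset_card_of_nodup (PySem.Set.nodup_ofList xs)
    rw [ofList_toFinset] at h1
    rw [h, List.card_toFinset] at h1
    exact List.dedup_eq_self.mp (List.Sublist.eq_of_length (List.dedup_sublist xs) h1)
  · intro h
    have h1 : (PySem.Set.ofList xs : List Int).toFinset.card = (PySem.Set.ofList xs : List Int).length :=
      List.toFinset_card_of_nodup (PySem.Set.nodup_ofList xs)
    have h2 : xs.toFinset.card = xs.length := List.toFinset_card_of_nodup h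
    rw [ofList_toFinset, h2] at h1
    omega

theorem le_getLast_of_pairwise (s : List Int) (hne : s ≠ []) (hs : s.Pairwise (· ≤ ·)) :
    ∀ y ∈ s, y ≤ s.getLast hne := by
  induction s with
  | nil => simp at hne
  | cons a t ih =>
    intro y hy
    cases t with
    | nil => simp at hy; simp [hy]
    | cons b u =>
      rw [List.getLast_cons (by simp)]
      rcases List.mem_cons.mp hy with h | h
      · subst h
        have hab : y ≤ b := (List.pairwise_cons.mp hs).1 b (by simp)
        calc y ≤ b := hab
          _ ≤ (b :: u).getLast (by simp) := ih (by simp) (List.pairwise_cons.mp hs).2 b (by simp)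
      · exact ih (by simp) (List.pairwise_cons.mp hs).2 y h

theorem last_ge_of_nodup (s : List Int) (hne : s ≠ []) (hs : s.Pairwise (· ≤ ·)) (hn : s.Nodup) :
    s.head hne + s.length - 1 ≤ s.getLast hne := by
  induction s with
  | nil => simp at hne
  | cons a t ih =>
    cases t with
    | nil => simp
    | cons b u =>
      rw [List.getLast_cons (by simp)]
      have hab : a ≤ b := (List.pairwise_cons.mp hs).1 b (by simp)
      have hne' : a ≠ b := by
        intro h; subst h; simp [List.nodup_cons] at hn
      have := ih (by simp) (List.pairwise_cons.mp hs).2 (List.nodup_cons.mp hn).2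
      simp only [List.head_cons, List.length_cons] at *
      push_cast at *
      omega

theorem adjB_iff (s : List Int) (hne : s ≠ []) (hs : s.Pairwise (· ≤ ·)) :
    adjB s = true ↔ s.Nodup ∧ s.getLast hne - s.head hne = (s.length : Int) - 1 := by
  induction s with
  | nil => simp at hne
  | cons a t ih =>
    cases t with
    | nil => simp [adjB]
    | cons b u =>
      have hs' : (b :: u).Pairwise (· ≤ ·) := (List.pairwise_cons.mp hs).2
      have hab : a ≤ b := (List.pairwise_cons.mp hs).1 b (by simp)
      have ihbu := ih (by simp) hs'
      rw [List.getLast_cons (by simp : (b :: u) ≠ [])]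
      simp only [adjB, Bool.and_eq_true, beq_iff_eq, List.head_cons, List.length_cons]
      constructor
      · rintro ⟨h1, h2⟩
        obtain ⟨hnd, hspan⟩ := ihbu.mp h2
        have hblast := le_getLast_of_pairwise (b :: u) (by simp) hs'
        constructor
        · rw [List.nodup_cons]
          refine ⟨?_, hnd⟩
          intro hmem
          have : a ≤ a - 1 + 1 - 1 := by
            have h3 : ∀ y ∈ (b :: u), b ≤ y := by
              intro y hy
              rcases List.mem_cons.mp hy with h | h
              · omega
              · have := (List.pairwise_cons.mp hs').1 y h; omega
            have := h3 a hmem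
            omega
          omega
        · simp only [List.head_cons, List.length_cons] at hspan
          push_cast at *
          omega
      · rintro ⟨hnd, hspan⟩
        have hne2 : a ≠ b := by
          intro h
          exact (List.nodup_cons.mp hnd).1 (by simp [h])
        have hlast_ge := last_ge_of_nodup (b :: u) (by simp) hs' (List.nodup_cons.mp hnd).2
        simp only [List.head_cons, List.length_cons] at *
        push_cast at *
        have hb : b = a + 1 := by omega
        refine ⟨by omega, ?_⟩
        apply ihbu.mpr
        refine ⟨(List.nodup_cons.mp hnd).2, ?_⟩
        omega

theorem head_le_of_pairwise (s : List Int) (hne : s ≠ []) (hs : s.Pairwise (· ≤ ·)) :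
    ∀ y ∈ s, s.head hne ≤ y := by
  cases s with
  | nil => cases hne rfl
  | cons a t =>
    intro y hy
    rcases List.mem_cons.mp hy with h | h
    · simp [h]
    · exact (List.pairwise_cons.mp hs).1 y h

theorem run_eq (xs : List Int) (hne : xs ≠ []) :
    ((PySem.List.pyRange 0 (((PySem.List.sorted xs (fun x => x) false).length : Int) - 1) 1).all
      (fun i => PySem.List.pyGetD (PySem.List.sorted xs (fun x => x) false) i 0 + 1 ==
                PySem.List.pyGetD (PySem.List.sorted xs (fun x => x) false) (i + 1) 0))
    = ((PySem.Set.ofList xs).length == xs.length &&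
        (match PySem.List.max? xs (fun x => x), PySem.List.min? xs (fun x => x) with
         | some mx, some mn => mx - mn == (xs.length : Int) - 1
         | _, _ => false)) := by
  obtain ⟨mx, hmx⟩ : ∃ mx, PySem.List.max? xs (fun x => x) = some mx := by
    cases h : PySem.List.max? xs (fun x => x) with
    | none => exact absurd ((PySem.List.max?_eq_none_iff xs _).mp h) hne
    | some m => exact ⟨m, rfl⟩
  obtain ⟨mn, hmn⟩ : ∃ mn, PySem.List.min? xs (fun x => x) = some mn := by
    cases h : PySem.List.min? xs (fun x => x) with
    | none => exact absurd ((PySem.List.min?_eq_none_iff xs _).mp h) hne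
    | some m => exact ⟨m, rfl⟩
  rw [hmx, hmn, allAdj_eq_adjB]
  have hperm := PySem.List.sorted_perm xs (fun x => x) false
  have hP : (PySem.List.sorted xs (fun x => x) false).Pairwise (· ≤ ·) :=
    PySem.List.sorted_pairwise xs (fun x => x)
  have hsne : PySem.List.sorted xs (fun x => x) false ≠ [] := by
    intro h
    rw [h] at hperm
    exact hne (hperm.nil_eq.symm)
  have hlen : (PySem.List.sorted xs (fun x => x) false).length = xs.length := hperm.length_eq
  have hmx_eq : mx = (PySem.List.sorted xs (fun x => x) false).getLast hsne := by
    apply le_antisymm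
    · exact le_getLast_of_pairwise _ hsne hP mx (hperm.mem_iff.mpr (PySem.List.max?_mem hmx))
    · exact PySem.List.max?_isMax hmx _ (hperm.subset (List.getLast_mem hsne))
  have hmn_eq : mn = (PySem.List.sorted xs (fun x => x) false).head hsne := by
    apply le_antisymm
    · exact PySem.List.min?_isMin hmn _ (hperm.subset (List.head_mem hsne))
    · exact head_le_of_pairwise _ hsne hP mn (hperm.mem_iff.mpr (PySem.List.min?_mem hmn))
  rw [Bool.eq_iff_iff]
  rw [adjB_iff _ hsne hP]
  simp only [Bool.and_eq_true, beq_iff_eq]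
  rw [hperm.nodup_iff, ← ofList_len_eq_iff, hmx_eq, hmn_eq, hlen]

-- ===== VERDICT (by name: the statement is the Claim_ definition above) =====
theorem is_valid_set_spec : Claim_equal_is_valid_set := by
  intro group _
  unfold Spec_is_valid_set is_valid_set is_valid_set_alt
  by_cases h3 : group.length < 3
  · simp [h3]
  · simp only [h3, if_false]
    by_cases hgrp : ((PySem.Set.ofList (group.map (fun p => p.2))).length == 1 &&
        (PySem.Set.ofList (group.map (fun p => p.1))).length == group.length) = true
    · simp [hgrp]
    · simp only [Bool.not_eq_true] at hgrp
      simp only [hgrp]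
      by_cases hcol : ((PySem.Set.ofList (group.map (fun p => p.1))).length == 1) = true
      · simp only [hcol, if_true]
        have hne : group.map (fun p => p.2) ≠ [] := by
          intro h
          rw [List.map_eq_nil_iff] at h
          subst h
          simp at h3
        have := run_eq (group.map (fun p => p.2)) hne
        simpa using this
      · simp only [Bool.not_eq_true] at hcol
        simp [hcol]
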